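-- pv_equiv track=rewrite | github.com/XyzHuy/-DL-Fine-tuning-coding-model | data/solution/Solution2189.py | houseOfCards
-- ===== SOURCE A (Python) =====
-- def houseOfCards(n: int) -> int:
--     # memoization dictionary to store the number of ways to build a house with a given number of cards and max base width
--     memo = {}
--
--     def dp(cards_left, max_base_width):
--         if (cards_left, max_base_width) in memo:
--             return memo[(cards_left, max_base_width)]
--
--         if cards_left < 0:
--             return 0
--
--         if cards_left == 0:
--             return 1
--
--         count = 0
--         # Try to place 1 to max_base_width triangles in the next row
--         for triangles in range(1, max_base_width):
--             # Cards needed for the current row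
--             cards_needed = 2 * triangles + (triangles - 1)
--             if cards_needed > cards_left:
--                 break
--             # Recur for the remaining cards and reduced base width
--             count += dp(cards_left - cards_needed, triangles)
--
--         memo[(cards_left, max_base_width)] = count
--         return count
--
--     # Start with n cards and the maximum base width which is n//2 + 1 (since each triangle needs 2 cards and 1 horizontal card between them)
--     return dp(n, n // 2 + 1)
-- ===== SOURCE B (Python) =====
-- def houseOfCards(n: int) -> int:
--     # Subset-sum DP: each row of t triangles uses 3*t - 1 cards and row sizes are
--     # strictly decreasing, so the answer is the number of sets of distinct costs
--     # {3*t - 1 : t >= 1} summing to n.  1D knapsack over a fresh list per item.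
--     if n < 0:
--         return 0
--     dp = [1] + [0] * n
--     for t in range(1, (n + 1) // 3 + 1):
--         c = 3 * t - 1
--         dp = [dp[s] + (dp[s - c] if s >= c else 0) for s in range(n + 1)]
--     return dp[n]
-- ===== Notes on version B (the rewrite author's own statement) =====
-- stated objective: faster
-- what changed: Replaced the memoized top-down recursion over (cards_left, max_base_width) states with a bottom-up 1D subset-sum knapsack over the distinct row costs 3t-1, since rows strictly decrease in size.
import Mathlib
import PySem

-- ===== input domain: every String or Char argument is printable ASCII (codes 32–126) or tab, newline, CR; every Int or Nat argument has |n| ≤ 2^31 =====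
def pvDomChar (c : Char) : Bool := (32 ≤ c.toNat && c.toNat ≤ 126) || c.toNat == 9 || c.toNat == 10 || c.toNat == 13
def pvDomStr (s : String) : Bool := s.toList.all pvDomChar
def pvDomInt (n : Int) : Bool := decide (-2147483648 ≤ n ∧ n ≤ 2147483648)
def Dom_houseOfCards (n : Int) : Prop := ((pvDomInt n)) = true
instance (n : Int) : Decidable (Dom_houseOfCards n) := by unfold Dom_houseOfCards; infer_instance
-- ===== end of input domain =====

-- B replaces A's memoized two-parameter recursion by a bottom-up 1D subset-sum knapsack
-- over the distinct row costs 3t-1 (objective: faster).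

-- ===== PORT A =====
-- A's memo dict only caches values of the pure inner function dp; it is dropped here
-- (value-preserving).  dp's `for triangles in range(1, max_base_width)` with `break`
-- becomes the inner loop `loopA` (j = triangles - 1), mutually recursive with dpA.
mutual
  def dpA (cards_left max_base_width : Int) : Int :=
    if cards_left < 0 then 0
    else if cards_left = 0 then 1
    else loopA cards_left max_base_width 0 0
  termination_by (cards_left.toNat, 1, 0)
  decreasing_by apply Prod.Lex.right; apply Prod.Lex.left; omega

  -- the loop body: triangles = 1 + j; break returns the accumulator
  def loopA (cards_left max_base_width : Int) (j : Nat) (count : Int) : Int :=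
    if _h1 : 1 + (j : Int) < max_base_width then
      let triangles : Int := 1 + (j : Int)
      let cards_needed := 2 * triangles + (triangles - 1)
      if _h2 : cards_needed > cards_left then count
      else loopA cards_left max_base_width (j + 1)
             (count + dpA (cards_left - cards_needed) triangles)
    else count
  termination_by (cards_left.toNat, 0, (max_base_width - 1 - (j : Int)).toNat)
  decreasing_by
    all_goals first
      | (apply Prod.Lex.left; omega)
      | (apply Prod.Lex.right; apply Prod.Lex.left; omega)
      | (apply Prod.Lex.right; apply Prod.Lex.right; omega)
end

def houseOfCards (n : Int) : Int :=
  dpA n (PySem.Int.floordiv n 2 + 1)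

-- ===== PORT B =====
-- one knapsack round: dp = [dp[s] + (dp[s-c] if s >= c else 0) for s in range(len(dp))]
def altStep (c : Nat) (dp : List Int) : List Int :=
  (List.range dp.length).map (fun s => dp.getD s 0 + if c ≤ s then dp.getD (s - c) 0 else 0)

def houseOfCards_alt (n : Int) : Int :=
  if n < 0 then 0
  else
    ((List.range ((n.toNat + 1) / 3)).foldl (fun dp i => altStep (3 * (i + 1) - 1) dp)
      (1 :: List.replicate n.toNat 0)).getD n.toNat 0

-- ===== PRECONDITION & SPEC =====
def Spec_houseOfCards (n : Int) (out : Int) : Prop := out = houseOfCards_alt n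
instance (n : Int) (out : Int) : Decidable (Spec_houseOfCards n out) := by unfold Spec_houseOfCards; infer_instance

-- ===== CLAIM (what is proved, stated in full; the proofs are below) =====
def Claim_equal_houseOfCards : Prop := ∀ (n : Int), Dom_houseOfCards n → Spec_houseOfCards n (houseOfCards n)

-- ===== LEMMAS AND PROOFS =====

-- f k cl = number of subsets of the costs {3t-1 : 1 ≤ t ≤ k} summing to cl
def f : Nat → Int → Int
  | 0, cl => if cl = 0 then 1 else 0
  | k + 1, cl => f k cl + f k (cl - (3 * ((k : Int) + 1) - 1))

theorem f_neg : ∀ (k : Nat) (cl : Int), cl < 0 → f k cl = 0 := by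
  intro k
  induction k with
  | zero => intro cl h; simp [f]; omega
  | succ m ih =>
      intro cl h
      have h2 : cl - (3 * ((m : Int) + 1) - 1) < 0 := by omega
      simp [f, ih cl h, ih _ h2]

theorem f_zero : ∀ (k : Nat), f k 0 = 1 := by
  intro k
  induction k with
  | zero => simp [f]
  | succ m ih =>
      have h2 : (0 : Int) - (3 * ((m : Int) + 1) - 1) < 0 := by omega
      rw [show f (m + 1) 0 = f m 0 + f m ((0 : Int) - (3 * ((m : Int) + 1) - 1)) from rfl,
          ih, f_neg _ _ h2]
      omega

theorem f_stab : ∀ (j k : Nat) (cl : Int), k ≤ j → cl < 3 * (k : Int) + 2 → f j cl = f k cl := by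
  intro j
  induction j with
  | zero => intro k cl hk _; interval_cases k; rfl
  | succ m ih =>
      intro k cl hk hcl
      rcases Nat.lt_or_ge k (m + 1) with hlt | hge
      · have hkm : k ≤ m := by omega
        have h2 : cl - (3 * ((m : Int) + 1) - 1) < 0 := by
          have : (k : Int) ≤ (m : Int) := by exact_mod_cast hkm
          omega
        simp [f, f_neg _ _ h2, ih k cl hkm hcl]
      · have : k = m + 1 := by omega
        subst this; rfl

-- hsum cl m j = Σ_{t = j+1}^{m} f (t-1) (cl - (3t-1))
def hsum (cl : Int) (m j : Nat) : Int :=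
  if _h : j < m then f j (cl - (3 * ((j : Int) + 1) - 1)) + hsum cl m (j + 1) else 0
termination_by m - j

theorem hsum_stop (cl : Int) (m j : Nat) (h : ¬ j < m) : hsum cl m j = 0 := by
  rw [hsum]; simp [h]

theorem hsum_step (cl : Int) (m j : Nat) (h : j < m) :
    hsum cl m j = f j (cl - (3 * ((j : Int) + 1) - 1)) + hsum cl m (j + 1) := by
  rw [hsum]; simp [h]

theorem hsum_zero (cl : Int) (m : Nat) : ∀ j : Nat, cl < 3 * (j : Int) + 2 → hsum cl m j = 0 := by
  intro j
  induction hd : m - j generalizing j with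
  | zero => intro hcl; exact hsum_stop cl m j (by omega)
  | succ d ih =>
      intro hcl
      by_cases h : j < m
      · rw [hsum_step cl m j h]
        have h1 : cl - (3 * ((j : Int) + 1) - 1) < 0 := by omega
        rw [f_neg _ _ h1, ih (j + 1) (by omega) (by push_cast; omega)]; ring
      · exact hsum_stop cl m j h

theorem hsum_append (cl : Int) (m : Nat) :
    ∀ j, j ≤ m → hsum cl (m + 1) j = hsum cl m j + f m (cl - (3 * ((m : Int) + 1) - 1)) := by
  intro j
  induction hd : m - j generalizing j with
  | zero =>
      intro hj
      have hej : j = m := by omega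
      rw [hej, hsum_step cl (m + 1) m (by omega), hsum_stop cl (m + 1) (m + 1) (by omega),
          hsum_stop cl m m (by omega)]
      ring
  | succ d ih =>
      intro hj
      have hjm : j < m := by omega
      rw [hsum_step cl (m + 1) j (by omega), hsum_step cl m j hjm,
          ih (j + 1) (by omega) (by omega)]
      ring

theorem f_eq_hsum (cl : Int) (hcl : 0 < cl) : ∀ m, f m cl = hsum cl m 0 := by
  intro m
  induction m with
  | zero =>
      rw [hsum_stop cl 0 0 (by omega)]
      simp [f]; omega
  | succ m ih =>
      rw [show f (m + 1) cl = f m cl + f m (cl - (3 * ((m : Int) + 1) - 1)) from rfl,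
          ih, hsum_append cl m 0 (by omega)]

theorem loopA_eq (cl mbw : Int)
    (IH : ∀ cl', 0 ≤ cl' → cl' < cl → ∀ mbw', dpA cl' mbw' = f ((mbw' - 1).toNat) cl') :
    ∀ j acc, loopA cl mbw j acc = acc + hsum cl ((mbw - 1).toNat) j := by
  intro j
  induction hd : (mbw - 1 - (j : Int)).toNat generalizing j with
  | zero =>
      intro acc
      rw [loopA]
      have h1 : ¬ (1 + (j : Int) < mbw) := by omega
      rw [dif_neg h1, hsum_stop cl _ j (by omega)]
      ring
  | succ d ih =>
      intro acc
      rw [loopA]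
      by_cases h1 : 1 + (j : Int) < mbw
      · rw [dif_pos h1]
        have hjm : j < (mbw - 1).toNat := by omega
        by_cases h2 : 2 * (1 + (j : Int)) + ((1 + (j : Int)) - 1) > cl
        · rw [dif_pos h2, hsum_zero cl _ j (by omega)]; ring
        · rw [dif_neg h2]
          have hc2 : (0 : Int) ≤ cl - (2 * (1 + (j : Int)) + ((1 + (j : Int)) - 1)) := by omega
          have hc3 : cl - (2 * (1 + (j : Int)) + ((1 + (j : Int)) - 1)) < cl := by omega
          rw [IH _ hc2 hc3 (1 + (j : Int)), ih (j + 1) (by push_cast; omega)]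
          rw [hsum_step cl _ j hjm]
          have hcast : ((1 + (j : Int)) - 1).toNat = j := by omega
          have harg : cl - (2 * (1 + (j : Int)) + ((1 + (j : Int)) - 1))
              = cl - (3 * ((j : Int) + 1) - 1) := by ring
          rw [hcast, harg]
          ring
      · rw [dif_neg h1, hsum_stop cl _ j (by omega)]; ring

theorem dpA_eq_f : ∀ (k : Nat) (cl : Int), cl.toNat = k → 0 ≤ cl →
    ∀ mbw, dpA cl mbw = f ((mbw - 1).toNat) cl := by
  intro k
  induction k using Nat.strong_induction_on with
  | _ k IH =>
      intro cl hk hcl mbw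
      rw [dpA]
      rcases lt_trichotomy cl 0 with h | h | h
      · omega
      · subst h; simp [f_zero]
      · rw [if_neg (by omega), if_neg (by omega)]
        have IH' : ∀ cl', 0 ≤ cl' → cl' < cl → ∀ mbw', dpA cl' mbw' = f ((mbw' - 1).toNat) cl' := by
          intro cl' h0 hlt mbw'
          exact IH cl'.toNat (by omega) cl' rfl h0 mbw'
        rw [loopA_eq cl mbw IH' 0 0, f_eq_hsum cl h]
        ring

-- B-side: the iterated knapsack rounds
def dpIter (n : Nat) : Nat → List Int
  | 0 => 1 :: List.replicate n 0
  | i + 1 => altStep (3 * (i + 1) - 1) (dpIter n i)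

theorem foldl_eq_dpIter (n : Nat) : ∀ K,
    (List.range K).foldl (fun dp i => altStep (3 * (i + 1) - 1) dp) (1 :: List.replicate n 0)
      = dpIter n K := by
  intro K
  induction K with
  | zero => rfl
  | succ K ih => rw [List.range_succ, List.foldl_append, ih]; rfl

theorem len_dpIter (n : Nat) : ∀ i, (dpIter n i).length = n + 1 := by
  intro i
  induction i with
  | zero => simp [dpIter]
  | succ i ih => simp [dpIter, altStep, ih]

theorem getD_map_range' (L : Nat) (fn : Nat → Int) (s : Nat) (hs : s < L) :
    ((List.range L).map fn).getD s 0 = fn s := by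
  rw [List.getD_eq_getElem?_getD]
  simp [hs]

theorem dpIter_inv (n : Nat) : ∀ i s, s ≤ n → (dpIter n i).getD s 0 = f i (s : Int) := by
  intro i
  induction i with
  | zero =>
      intro s hs
      cases s with
      | zero => simp [dpIter, f]
      | succ s => simp [dpIter, f]; omega
  | succ i ih =>
      intro s hs
      have hlen : (dpIter n i).length = n + 1 := len_dpIter n i
      rw [dpIter, altStep, hlen, getD_map_range' (n + 1) _ s (by omega)]
      rw [show f (i + 1) (s : Int) = f i (s : Int) + f i ((s : Int) - (3 * ((i : Int) + 1) - 1)) from rfl]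
      rw [ih s hs]
      congr 1
      by_cases hc : 3 * (i + 1) - 1 ≤ s
      · rw [if_pos hc, ih (s - (3 * (i + 1) - 1)) (by omega)]
        congr 1
        push_cast [Nat.cast_sub hc]
        omega
      · rw [if_neg hc, f_neg i _ (by omega)]

-- ===== VERDICT (by name: the statement is the Claim_ definition above) =====
theorem houseOfCards_spec : Claim_equal_houseOfCards := by
  unfold Claim_equal_houseOfCards Spec_houseOfCards
  intro n _
  unfold houseOfCards houseOfCards_alt
  by_cases hn : n < 0
  · rw [if_pos hn, dpA, if_pos hn]
  · rw [if_neg hn]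
    have h0 : 0 ≤ n := by omega
    have hfd : PySem.Int.floordiv n 2 = n / 2 := PySem.Int.floordiv_eq_ediv_of_pos (by omega)
    rw [dpA_eq_f n.toNat n rfl h0, hfd, foldl_eq_dpIter,
        dpIter_inv n.toNat ((n.toNat + 1) / 3) n.toNat (by omega)]
    have hcast : ((n.toNat : Nat) : Int) = n := by omega
    rw [hcast]
    exact f_stab ((n / 2 + 1 - 1).toNat) ((n.toNat + 1) / 3) n (by omega) (by omega)
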